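-- pv_equiv track=rewrite | github.com/rodchristiansen/munkiadmin | MunkiAdmin/Scripts/yaml_bridge.py | sort_manifest_keys
-- ===== SOURCE A (Python) =====
-- MANIFEST_PRIORITY_KEYS = ['catalogs']
--
-- MANIFEST_LAST_KEYS = ['included_manifests']
--
-- def sort_manifest_keys(keys):
--     """Sort manifest dictionary keys with custom ordering.
--
--     - catalogs appears first
--     - included_manifests appears last
--     - All other keys appear alphabetically in between
--     """
--     first_keys = []
--     middle_keys = []
--     end_keys = []
--
--     for key in keys:
--         if key in MANIFEST_PRIORITY_KEYS:
--             first_keys.append(key)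
--         elif key in MANIFEST_LAST_KEYS:
--             end_keys.append(key)
--         else:
--             middle_keys.append(key)
--
--     # Sort first keys by their position in MANIFEST_PRIORITY_KEYS
--     first_keys.sort(key=lambda k: MANIFEST_PRIORITY_KEYS.index(k) if k in MANIFEST_PRIORITY_KEYS else 999)
--
--     # Sort middle keys alphabetically
--     middle_keys.sort()
--
--     # Sort end keys alphabetically
--     end_keys.sort()
--
--     return first_keys + middle_keys + end_keys
-- ===== SOURCE B (Python) =====
-- MANIFEST_PRIORITY_KEYS = ['catalogs']
--
-- MANIFEST_LAST_KEYS = ['included_manifests']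
--
-- def sort_manifest_keys(keys):
--     """One stable sort with a composite rank instead of partition-sort-concatenate."""
--     n = len(MANIFEST_PRIORITY_KEYS)
--     def rank(key):
--         if key in MANIFEST_PRIORITY_KEYS:
--             return (MANIFEST_PRIORITY_KEYS.index(key), key)
--         if key in MANIFEST_LAST_KEYS:
--             return (n + 1, key)
--         return (n, key)
--     return sorted(keys, key=rank)
-- ===== Notes on version B (the rewrite author's own statement) =====
-- stated objective: simpler
-- what changed: Replaced A's three-bucket partition pass plus three separate sorts and concatenation by a single stable sort of the whole list under a composite (group-rank, key) sort key.
import Mathlib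
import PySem

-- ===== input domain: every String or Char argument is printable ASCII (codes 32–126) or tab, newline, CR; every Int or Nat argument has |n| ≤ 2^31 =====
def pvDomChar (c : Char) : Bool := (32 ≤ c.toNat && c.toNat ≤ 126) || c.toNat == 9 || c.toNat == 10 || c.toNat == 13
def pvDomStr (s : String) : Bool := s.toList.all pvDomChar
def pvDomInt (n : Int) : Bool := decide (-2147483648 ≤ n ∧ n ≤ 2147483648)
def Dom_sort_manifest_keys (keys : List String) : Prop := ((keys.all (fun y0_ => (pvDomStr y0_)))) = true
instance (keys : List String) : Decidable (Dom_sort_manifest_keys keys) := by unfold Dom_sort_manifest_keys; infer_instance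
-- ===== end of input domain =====

-- B replaces A's partition-into-three-buckets + three sorts + concatenation by ONE stable
-- sort of the whole list under a composite (group-rank, key) sort key; objective: simpler.

-- ===== PORT A =====
def MANIFEST_PRIORITY_KEYS : List String := ["catalogs"]

def MANIFEST_LAST_KEYS : List String := ["included_manifests"]

-- the for-loop: one pass appending each key to one of the three buckets
def pvPartA (keys : List String) : List String × List String × List String :=
  keys.foldl (fun acc key =>
    if MANIFEST_PRIORITY_KEYS.contains key then (acc.1 ++ [key], acc.2.1, acc.2.2)
    else if MANIFEST_LAST_KEYS.contains key then (acc.1, acc.2.1, acc.2.2 ++ [key])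
    else (acc.1, acc.2.1 ++ [key], acc.2.2)) ([], [], [])

def sort_manifest_keys (keys : List String) : List String :=
  let p := pvPartA keys
  let first_keys := PySem.List.sorted p.1
    (fun k => if MANIFEST_PRIORITY_KEYS.contains k
              then (((PySem.List.index? MANIFEST_PRIORITY_KEYS k).getD 0 : Nat) : Int)
              else 999)
  let middle_keys := PySem.List.sorted p.2.1 (fun k => k)
  let end_keys := PySem.List.sorted p.2.2 (fun k => k)
  first_keys ++ middle_keys ++ end_keys

-- ===== PORT B =====
-- rank(key): first component of B's composite sort key
def pvRank (key : String) : Int :=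
  if MANIFEST_PRIORITY_KEYS.contains key
  then (((PySem.List.index? MANIFEST_PRIORITY_KEYS key).getD 0 : Nat) : Int)
  else if MANIFEST_LAST_KEYS.contains key then (MANIFEST_PRIORITY_KEYS.length : Int) + 1
  else (MANIFEST_PRIORITY_KEYS.length : Int)

def sort_manifest_keys_alt (keys : List String) : List String :=
  PySem.List.sorted2 keys pvRank (fun key => key)

-- ===== PRECONDITION & SPEC =====
def Spec_sort_manifest_keys (keys : List String) (out : List String) : Prop := out = sort_manifest_keys_alt keys
instance (keys : List String) (out : List String) : Decidable (Spec_sort_manifest_keys keys out) := by unfold Spec_sort_manifest_keys; infer_instance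

-- ===== CLAIM (what is proved, stated in full; the proofs are below) =====
def Claim_equal_sort_manifest_keys : Prop := ∀ (keys : List String), Dom_sort_manifest_keys keys → Spec_sort_manifest_keys keys (sort_manifest_keys keys)

-- ===== LEMMAS AND PROOFS =====

-- the three buckets, as filters of the input
def pvC (keys : List String) : List String := keys.filter (fun k => k == "catalogs")
def pvM (keys : List String) : List String :=
  keys.filter (fun k => !(k == "catalogs") && !(k == "included_manifests"))
def pvI (keys : List String) : List String := keys.filter (fun k => k == "included_manifests")

theorem pvRank_eq (k : String) :
    pvRank k = if k = "catalogs" then 0 else if k = "included_manifests" then 2 else 1 := by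
  simp only [pvRank, MANIFEST_PRIORITY_KEYS, MANIFEST_LAST_KEYS, List.contains_cons,
    List.contains_nil, Bool.or_false, beq_iff_eq]
  by_cases h1 : k = "catalogs" <;> by_cases h2 : k = "included_manifests" <;>
    simp [h1, h2, PySem.List.index?]

theorem pvPartA_eq (keys : List String) :
    ∀ a b c : List String,
      (keys.foldl (fun acc key =>
        if MANIFEST_PRIORITY_KEYS.contains key then (acc.1 ++ [key], acc.2.1, acc.2.2)
        else if MANIFEST_LAST_KEYS.contains key then (acc.1, acc.2.1, acc.2.2 ++ [key])
        else (acc.1, acc.2.1 ++ [key], acc.2.2)) (a, b, c))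
      = (a ++ pvC keys, b ++ pvM keys, c ++ pvI keys) := by
  induction keys with
  | nil => simp [pvC, pvM, pvI]
  | cons x xs ih =>
      intro a b c
      simp only [List.foldl_cons]
      split_ifs with h1 h2
      · simp only [MANIFEST_PRIORITY_KEYS, List.contains_cons, List.contains_nil,
          Bool.or_false, beq_iff_eq] at h1
        rw [ih]
        simp [pvC, pvM, pvI, h1, List.append_assoc]
      · simp only [MANIFEST_PRIORITY_KEYS, MANIFEST_LAST_KEYS, List.contains_cons,
          List.contains_nil, Bool.or_false, beq_iff_eq] at h1 h2
        rw [ih]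
        simp [pvC, pvM, pvI, h2, List.append_assoc]
      · simp only [MANIFEST_PRIORITY_KEYS, MANIFEST_LAST_KEYS, List.contains_cons,
          List.contains_nil, Bool.or_false, beq_iff_eq] at h1 h2
        rw [ih]
        simp [pvC, pvM, pvI, h1, h2, List.append_assoc]

-- a sort of a list whose elements are all equal is the identity
theorem sorted_const {κ : Type} [LinearOrder κ] (l : List String) (v : String)
    (key : String → κ) (h : ∀ x ∈ l, x = v) : PySem.List.sorted l key false = l := by
  apply PySem.List.sorted_eq_self_of_pairwise
  apply List.pairwise_of_forall_mem_list
  intro a ha b hb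
  rw [h a ha, h b hb]

-- B's comparison function (what sorted2 uses)
def pvLt (a b : String) : Bool :=
  decide (pvRank a < pvRank b) || (!decide (pvRank b < pvRank a) && decide (a < b))

theorem sorted2_snoc (xs : List String) (x : String) :
    PySem.List.sorted2 (xs ++ [x]) pvRank (fun k => k)
      = PySem.List.insertBy pvLt x (PySem.List.sorted2 xs pvRank (fun k => k)) := by
  show List.foldl (fun acc y => PySem.List.insertBy pvLt y acc) [] (xs ++ [x])
      = PySem.List.insertBy pvLt x (List.foldl (fun acc y => PySem.List.insertBy pvLt y acc) [] xs)
  rw [List.foldl_append]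
  rfl

theorem sorted_snoc (xs : List String) (x : String) :
    PySem.List.sorted (xs ++ [x]) (fun k : String => k) false
      = PySem.List.insertBy (fun a b => decide (a < b)) x
          (PySem.List.sorted xs (fun k : String => k) false) := by
  rw [PySem.List.sorted_eq_foldl_insertBy, PySem.List.sorted_eq_foldl_insertBy,
    List.foldl_append]
  simp

theorem insertBy_append_not_before {α : Type} (before : α → α → Bool) (x : α)
    (as bs : List α) (h : ∀ a ∈ as, before x a = false) :
    PySem.List.insertBy before x (as ++ bs) = as ++ PySem.List.insertBy before x bs := by
  induction as with
  | nil => simp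
  | cons a t ih =>
      simp only [List.cons_append, PySem.List.insertBy, h a (List.mem_cons_self),
        Bool.false_eq_true, if_false]
      simp [ih (fun a ha => h a (List.mem_cons_of_mem _ ha))]

theorem insertBy_all_before {α : Type} (before : α → α → Bool) (x : α)
    (ys : List α) (h : ∀ y ∈ ys, before x y = true) :
    PySem.List.insertBy before x ys = x :: ys := by
  cases ys with
  | nil => rfl
  | cons y t => simp [PySem.List.insertBy, h y (List.mem_cons_self)]

-- members of the buckets
theorem mem_pvC {k : String} {keys : List String} (h : k ∈ pvC keys) : k = "catalogs" := by
  simp [pvC, List.mem_filter] at h; exact h.2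
theorem mem_pvI {k : String} {keys : List String} (h : k ∈ pvI keys) :
    k = "included_manifests" := by
  simp [pvI, List.mem_filter] at h; exact h.2
theorem mem_pvM {k : String} {keys : List String} (h : k ∈ pvM keys) :
    k ≠ "catalogs" ∧ k ≠ "included_manifests" := by
  simp [pvM, List.mem_filter] at h; exact h.2
theorem mem_sortedM {k : String} {keys : List String}
    (h : k ∈ PySem.List.sorted (pvM keys) (fun k => k) false) :
    k ≠ "catalogs" ∧ k ≠ "included_manifests" :=
  mem_pvM ((PySem.List.mem_sorted _ _ _ _).mp h)

-- inserting a middle key into (middle-sorted ++ last-bucket)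
theorem insert_mid (x : String) (hx1 : x ≠ "catalogs") (hx2 : x ≠ "included_manifests") :
    ∀ (S I : List String), (∀ s ∈ S, s ≠ "catalogs" ∧ s ≠ "included_manifests") →
      (∀ i ∈ I, i = "included_manifests") →
      PySem.List.insertBy pvLt x (S ++ I)
        = PySem.List.insertBy (fun a b => decide (a < b)) x S ++ I := by
  intro S
  induction S with
  | nil =>
      intro I _ hI
      simp only [List.nil_append]
      cases I with
      | nil => rfl
      | cons i t =>
          have hi := hI i (List.mem_cons_self)
          have : pvLt x i = true := by
            simp [pvLt, pvRank_eq, hx1, hx2, hi]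
          simp [PySem.List.insertBy, this]
  | cons s t ih =>
      intro I hS hI
      have hs := hS s (List.mem_cons_self)
      have hcmp : pvLt x s = decide (x < s) := by
        simp [pvLt, pvRank_eq, hx1, hx2, hs.1, hs.2]
      by_cases h : x < s
      · simp [PySem.List.insertBy, hcmp, h]
      · simp only [List.cons_append, PySem.List.insertBy, hcmp]
        simp [h, ih I (fun a ha => hS a (List.mem_cons_of_mem _ ha)) hI]

-- the heart of the proof: B's single keyed stable sort produces exactly
-- first-bucket ++ sorted middle ++ last-bucket
theorem altEq (keys : List String) :
    PySem.List.sorted2 keys pvRank (fun k => k)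
      = pvC keys ++ PySem.List.sorted (pvM keys) (fun k => k) false ++ pvI keys := by
  induction keys using List.reverseRecOn with
  | nil => simp [pvC, pvM, pvI, PySem.List.sorted2, PySem.List.sorted]
  | append_singleton xs x ih =>
      rw [sorted2_snoc, ih]
      by_cases h1 : x = "catalogs"
      · subst h1
        rw [List.append_assoc]
        rw [insertBy_append_not_before _ _ _ _ (by
          intro a ha
          have := mem_pvC ha
          simp [pvLt, pvRank_eq, this])]
        rw [insertBy_all_before _ _ _ (by
          intro y hy
          rcases List.mem_append.mp hy with hy | hy
          · have := mem_sortedM hy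
            simp [pvLt, pvRank_eq, this.1, this.2]
          · have := mem_pvI hy
            simp [pvLt, pvRank_eq, this])]
        simp [pvC, pvM, pvI, List.filter_append, List.append_assoc]
      · by_cases h2 : x = "included_manifests"
        · subst h2
          rw [PySem.List.insertBy_of_forall_not_before pvLt "included_manifests" _ (by
            intro y hy
            rcases List.mem_append.mp hy with hy | hy
            · rcases List.mem_append.mp hy with hy | hy
              · have := mem_pvC hy
                simp [pvLt, pvRank_eq, this]
              · have := mem_sortedM hy
                simp [pvLt, pvRank_eq, this.1, this.2]
            · have := mem_pvI hy
              simp [pvLt, pvRank_eq, this])]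
          simp [pvC, pvM, pvI, List.filter_append]
        · rw [List.append_assoc, insertBy_append_not_before _ _ _ _ (by
            intro a ha
            have := mem_pvC ha
            simp [pvLt, pvRank_eq, this, h1, h2])]
          rw [insert_mid x h1 h2 _ _ (fun s hs => mem_sortedM hs) (fun i hi => mem_pvI hi)]
          rw [← sorted_snoc]
          simp [pvC, pvM, pvI, List.filter_append, h1, h2, List.append_assoc]

-- ===== VERDICT (by name: the statement is the Claim_ definition above) =====
theorem sort_manifest_keys_spec : Claim_equal_sort_manifest_keys := by
  intro keys _
  unfold Spec_sort_manifest_keys sort_manifest_keys sort_manifest_keys_alt pvPartA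
  rw [pvPartA_eq keys [] [] []]
  simp only [List.nil_append]
  rw [sorted_const (pvC keys) "catalogs" _ (fun x hx => mem_pvC hx),
      sorted_const (pvI keys) "included_manifests" _ (fun x hx => mem_pvI hx),
      altEq]
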